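-- pv_equiv track=rewrite | github.com/mellcs/laboratorio-de-algoritmos-I | exercícios_de_vetores/exercício01.py | contar_maior_que_30
-- ===== SOURCE A (Python) =====
-- def contar_maior_que_30(vetor):
--     contador = 0
--     soma = 0
--     for numero in vetor:
--         if numero > 30:
--             contador += 1
--             soma += numero
--     return contador, soma
-- ===== SOURCE B (Python) =====
-- def contar_maior_que_30(vetor):
--     # Sort, binary-search the cutoff (first index > 30), aggregate the suffix.
--     sv = sorted(vetor)
--     lo, hi = 0, len(sv)
--     while lo < hi:
--         mid = (lo + hi) // 2
--         if sv[mid] > 30: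
--             hi = mid
--         else:
--             lo = mid + 1
--     resto = sv[lo:]
--     return len(resto), sum(resto)
-- ===== Notes on version B (the rewrite author's own statement) =====
-- stated objective: alternative
-- what changed: Replaces A's single fused filtering loop by sort-then-binary-search: sort the list, binary-search the first index whose value exceeds 30, and return the length and sum of that suffix (correct because after sorting the qualifying elements are exactly a suffix, and count/sum are permutation-invariant).
import Mathlib
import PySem

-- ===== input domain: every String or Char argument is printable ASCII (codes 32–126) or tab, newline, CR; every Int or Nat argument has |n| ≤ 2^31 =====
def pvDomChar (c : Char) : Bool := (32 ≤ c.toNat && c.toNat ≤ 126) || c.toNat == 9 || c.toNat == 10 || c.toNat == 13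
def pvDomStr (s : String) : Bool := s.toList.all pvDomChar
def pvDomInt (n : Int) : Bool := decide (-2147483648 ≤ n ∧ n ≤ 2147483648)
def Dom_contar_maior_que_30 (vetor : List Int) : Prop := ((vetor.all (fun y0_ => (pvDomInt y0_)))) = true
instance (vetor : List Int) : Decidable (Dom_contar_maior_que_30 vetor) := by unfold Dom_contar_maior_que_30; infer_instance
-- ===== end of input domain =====

-- B replaces A's fused count+sum loop by sort → binary-search cutoff → suffix aggregation (alternative algorithm, O(n log n)).


-- ===== PORT A =====
-- fused loop: fold carrying (contador, soma)
def contar_maior_que_30 (vetor : List Int) : Int × Int :=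
  vetor.foldl (fun st numero =>
    if numero > 30 then (st.1 + 1, st.2 + numero) else st) (0, 0)

-- ===== PORT B =====
-- the while-loop binary search of Source B; lo/hi are always nonnegative, so Nat is exact,
-- and `(lo+hi)//2` on nonnegative ints is Nat division; sv[mid] has lo ≤ mid < hi ≤ len(sv),
-- always in range, so getD is exact there
def pvBSearch (sv : List Int) (lo hi : Nat) : Nat :=
  if lo < hi then
    let mid := (lo + hi) / 2
    if sv.getD mid 0 > 30 then pvBSearch sv lo mid else pvBSearch sv (mid + 1) hi
  else lo
termination_by hi - lo
decreasing_by all_goals omega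

-- sorted(vetor); binary search for first index > 30; slice the suffix; aggregate it
def contar_maior_que_30_alt (vetor : List Int) : Int × Int :=
  let sv := PySem.List.sorted vetor (fun x => x) false
  let lo := pvBSearch sv 0 sv.length
  let resto := PySem.List.slice sv (some (lo : Int)) none
  ((resto.length : Int), resto.sum)

-- ===== PRECONDITION & SPEC =====
def Spec_contar_maior_que_30 (vetor : List Int) (out : Int × Int) : Prop := out = contar_maior_que_30_alt vetor
instance (vetor : List Int) (out : Int × Int) : Decidable (Spec_contar_maior_que_30 vetor out) := by unfold Spec_contar_maior_que_30; infer_instance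

-- ===== CLAIM (what is proved, stated in full; the proofs are below) =====
def Claim_equal_contar_maior_que_30 : Prop := ∀ (vetor : List Int), Dom_contar_maior_que_30 vetor → Spec_contar_maior_que_30 vetor (contar_maior_que_30 vetor)

-- ===== LEMMAS AND PROOFS =====

-- A's fold computes (count, sum) of the filtered list
theorem contar_fold_general (vetor : List Int) (c s : Int) :
    vetor.foldl (fun st numero =>
      if numero > 30 then (st.1 + 1, st.2 + numero) else st) (c, s)
    = (c + ((vetor.filter (fun n => 30 < n)).length : Int),
       s + (vetor.filter (fun n => 30 < n)).sum) := by
  induction vetor generalizing c s with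
  | nil => simp
  | cons x xs ih =>
    by_cases h : x > 30
    · simp [List.foldl, List.filter, h, ih]; constructor <;> ring
    · simp [List.foldl, List.filter, h, ih]

-- binary-search invariant: on a list monotone under getD, from a state whose prefix is ≤ 30
-- and whose tail-from-hi is > 30, the result i splits the list at the first element > 30
theorem pvBSearch_spec (sv : List Int) (lo hi : Nat)
    (hmono : ∀ p q : Nat, p ≤ q → q < sv.length → sv.getD p 0 ≤ sv.getD q 0)
    (hle : lo ≤ hi) (hhi : hi ≤ sv.length)
    (h1 : ∀ j : Nat, j < lo → sv.getD j 0 ≤ 30)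
    (h2 : ∀ j : Nat, hi ≤ j → j < sv.length → 30 < sv.getD j 0) :
    (∀ j : Nat, j < pvBSearch sv lo hi → sv.getD j 0 ≤ 30) ∧
    (∀ j : Nat, pvBSearch sv lo hi ≤ j → j < sv.length → 30 < sv.getD j 0) := by
  by_cases h : lo < hi
  · rw [pvBSearch, if_pos h]
    set mid := (lo + hi) / 2 with hmid
    have hmlt : mid < hi := by omega
    have hmlen : mid < sv.length := by omega
    by_cases hv : sv.getD mid 0 > 30
    · rw [if_pos hv]
      exact pvBSearch_spec sv lo mid hmono (by omega) (by omega) h1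
        (fun j hj hjl => lt_of_lt_of_le hv (hmono mid j hj hjl))
    · rw [if_neg hv]
      exact pvBSearch_spec sv (mid + 1) hi hmono (by omega) hhi
        (fun j hj => le_trans (hmono j mid (by omega) hmlen) (by omega)) h2
  · rw [pvBSearch, if_neg h]
    exact ⟨h1, fun j hj hjl => h2 j (by omega) hjl⟩
termination_by hi - lo
decreasing_by all_goals omega

-- a split index turns the filter into the suffix
theorem drop_eq_filter (sv : List Int) (i : Nat)
    (h1 : ∀ j : Nat, j < i → sv.getD j 0 ≤ 30)
    (h2 : ∀ j : Nat, i ≤ j → j < sv.length → 30 < sv.getD j 0) :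
    sv.drop i = sv.filter (fun n => 30 < n) := by
  induction sv generalizing i with
  | nil => simp
  | cons x xs ih =>
    cases i with
    | zero =>
      rw [List.drop_zero]
      symm
      rw [List.filter_eq_self]
      intro a ha
      obtain ⟨j, hj, hja⟩ := List.mem_iff_getElem.mp ha
      have := h2 j (Nat.zero_le j) hj
      rw [List.getD_eq_getElem _ _ hj, hja] at this
      simpa using this
    | succ k =>
      have hx : x ≤ 30 := by simpa using h1 0 (Nat.succ_pos k)
      have hxf : ¬ (30 < x) := by omega
      simp only [List.drop_succ_cons, List.filter_cons, hxf, decide_false,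
        Bool.false_eq_true, if_false]
      exact ih k (fun j hj => by simpa using h1 (j + 1) (by omega))
        (fun j hj hjl => by simpa using h2 (j + 1) (by omega) (by simpa using hjl))

-- ===== VERDICT (by name: the statement is the Claim_ definition above) =====
theorem contar_maior_que_30_spec : Claim_equal_contar_maior_que_30 := by
  intro vetor _
  unfold Spec_contar_maior_que_30 contar_maior_que_30 contar_maior_que_30_alt
  set sv := PySem.List.sorted vetor (fun x => x) false with hsv
  have hperm : sv.Perm vetor := PySem.List.sorted_perm vetor (fun x => x) false
  have hmono : ∀ p q : Nat, p ≤ q → q < sv.length → sv.getD p 0 ≤ sv.getD q 0 := by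
    intro p q hpq hq
    rw [List.getD_eq_getElem _ _ (by omega), List.getD_eq_getElem _ _ hq]
    exact PySem.List.sorted_id_getElem_mono vetor hpq hq
  have hspec := pvBSearch_spec sv 0 sv.length hmono (Nat.zero_le _) le_rfl
    (fun j hj => absurd hj (Nat.not_lt_zero j)) (fun j hj hjl => absurd hjl (by omega))
  have hdrop : sv.drop (pvBSearch sv 0 sv.length) = sv.filter (fun n => 30 < n) :=
    drop_eq_filter sv _ hspec.1 hspec.2
  have hfperm : (sv.filter (fun n => 30 < n)).Perm (vetor.filter (fun n => 30 < n)) :=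
    hperm.filter _
  rw [contar_fold_general]
  simp only [PySem.List.slice_from_natCast, hdrop, zero_add]
  rw [hfperm.length_eq, hfperm.sum_eq]
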